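-- pv_equiv track=rewrite | github.com/developer124320/FlightPO | FlightPlannerTask/Type/CRC.py | smethod_8
-- ===== SOURCE A (Python) =====
-- import  math
--
-- def smethod_8(int_0, bool_0):
--     chrC = '\0';
--
--     for i in range(4):
--         if (bool_0[int_0 + (3 - i)]):
--             chrC = chr(ord(chrC) + int(math.pow(2, float(i))));
--     resultStr = hex(ord(chrC))
--     resultStr = resultStr.replace("0x", "")
--     # resultStr.replace("0X", "")
--     return resultStr
-- ===== SOURCE B (Python) =====
-- # Hex nibble via a precomputed lookup table keyed by the 4-bit tuple: no loop, no arithmetic.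
-- _HEX = {
--     (False, False, False, False): '0',
--     (False, False, False, True): '1',
--     (False, False, True, False): '2',
--     (False, False, True, True): '3',
--     (False, True, False, False): '4',
--     (False, True, False, True): '5',
--     (False, True, True, False): '6',
--     (False, True, True, True): '7',
--     (True, False, False, False): '8',
--     (True, False, False, True): '9',
--     (True, False, True, False): 'a',
--     (True, False, True, True): 'b',
--     (True, True, False, False): 'c',
--     (True, True, False, True): 'd',
--     (True, True, True, False): 'e',
--     (True, True, True, True): 'f',
-- }
--
-- def smethod_8(int_0, bool_0):
--     return _HEX[(bool_0[int_0], bool_0[int_0 + 1], bool_0[int_0 + 2], bool_0[int_0 + 3])]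
-- ===== Notes on version B (the rewrite author's own statement) =====
-- stated objective: alternative
-- what changed: Replaces A's loop that accumulates powers of two via chr/ord arithmetic and hex()/replace string surgery with a precomputed 16-entry dictionary keyed by the 4-bit tuple, looked up once with no loop and no arithmetic.
import Mathlib
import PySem

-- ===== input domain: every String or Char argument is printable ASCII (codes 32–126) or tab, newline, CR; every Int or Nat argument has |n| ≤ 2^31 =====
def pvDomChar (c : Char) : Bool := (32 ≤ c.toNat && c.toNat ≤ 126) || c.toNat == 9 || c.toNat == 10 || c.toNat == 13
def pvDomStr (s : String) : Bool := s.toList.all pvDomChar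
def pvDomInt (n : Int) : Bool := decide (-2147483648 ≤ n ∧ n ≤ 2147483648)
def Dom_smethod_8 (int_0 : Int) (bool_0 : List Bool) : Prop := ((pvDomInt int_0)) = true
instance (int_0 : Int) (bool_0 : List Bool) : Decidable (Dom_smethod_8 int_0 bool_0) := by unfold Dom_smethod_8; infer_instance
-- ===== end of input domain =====

-- B replaces A's power-of-two/chr-ord loop plus hex()/replace with a single lookup in a precomputed 16-entry table keyed by the 4-bit tuple; objective: alternative.


-- ===== PORT A =====
def pyHexDigits : List Char := ['0','1','2','3','4','5','6','7','8','9','a','b','c','d','e','f']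

-- hand port of Python's built-in hex(n) for n ≥ 0 (exact there): "0x" + base-16 digits
-- structural recursion on a fuel argument; fuel = n suffices since n/16 < n for n > 0
def pyHexAux : Nat → Nat → List Char
  | 0, _ => []
  | _+1, 0 => []
  | fuel+1, n => pyHexAux fuel (n / 16) ++ [pyHexDigits.getD (n % 16) '0']

def pyHex (n : Nat) : String := "0x" ++ (if n = 0 then "0" else String.ofList (pyHexAux n n))

def smethod_8 (int_0 : Int) (bool_0 : List Bool) : String :=
  -- chrC carried as its code point (ord); chr/ord round-trips are identities on it
  let c : Option Nat := (PySem.List.pyRange 0 4 1).foldl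
    (fun acc i => acc.bind fun c =>
      (PySem.List.pyGet? bool_0 (int_0 + (3 - i))).map fun b =>
        if b then c + 2 ^ i.toNat else c) (some 0)
  match c with
  | some n => PySem.Str.replace (pyHex n) "0x" ""
  | none => ""   -- IndexError mid-loop; excluded by Pre_smethod_8

-- ===== PORT B =====
-- the module-level dict _HEX, in the same insertion order
def pvHexTable : PySem.Dict (Bool × Bool × Bool × Bool) String :=
  PySem.Dict.ofList
  [((false, false, false, false), "0"),
   ((false, false, false, true), "1"),
   ((false, false, true, false), "2"),
   ((false, false, true, true), "3"),
   ((false, true, false, false), "4"),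
   ((false, true, false, true), "5"),
   ((false, true, true, false), "6"),
   ((false, true, true, true), "7"),
   ((true, false, false, false), "8"),
   ((true, false, false, true), "9"),
   ((true, false, true, false), "a"),
   ((true, false, true, true), "b"),
   ((true, true, false, false), "c"),
   ((true, true, false, true), "d"),
   ((true, true, true, false), "e"),
   ((true, true, true, true), "f")]

def smethod_8_alt (int_0 : Int) (bool_0 : List Bool) : String :=
  match PySem.List.pyGet? bool_0 int_0, PySem.List.pyGet? bool_0 (int_0 + 1),
        PySem.List.pyGet? bool_0 (int_0 + 2), PySem.List.pyGet? bool_0 (int_0 + 3) with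
  | some b0, some b1, some b2, some b3 =>
      -- _HEX[key]: the table is total over Bool⁴, so KeyError is impossible; getD "" is never the default
      PySem.Dict.getD pvHexTable (b0, b1, b2, b3) ""
  | _, _, _, _ => ""   -- IndexError building the tuple; excluded by Pre_smethod_8

-- ===== PRECONDITION & SPEC =====
-- Pre_ excludes exactly the inputs where Python A raises IndexError (some bool_0[int_0+j] out of range).
def Pre_smethod_8 (int_0 : Int) (bool_0 : List Bool) : Prop :=
  PySem.Raise.InRange bool_0.length int_0 ∧
  PySem.Raise.InRange bool_0.length (int_0 + 1) ∧
  PySem.Raise.InRange bool_0.length (int_0 + 2) ∧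
  PySem.Raise.InRange bool_0.length (int_0 + 3)
instance (int_0 : Int) (bool_0 : List Bool) : Decidable (Pre_smethod_8 int_0 bool_0) := by unfold Pre_smethod_8; infer_instance

def pvWitness_smethod_8 : Int × List Bool := (0, [true, false, true, true])

def Spec_smethod_8 (int_0 : Int) (bool_0 : List Bool) (out : String) : Prop := out = smethod_8_alt int_0 bool_0
instance (int_0 : Int) (bool_0 : List Bool) (out : String) : Decidable (Spec_smethod_8 int_0 bool_0 out) := by unfold Spec_smethod_8; infer_instance

-- ===== CLAIM (what is proved, stated in full; the proofs are below) =====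
def Claim_equal_smethod_8 : Prop := ∀ (int_0 : Int) (bool_0 : List Bool), Dom_smethod_8 int_0 bool_0 → Pre_smethod_8 int_0 bool_0 → Spec_smethod_8 int_0 bool_0 (smethod_8 int_0 bool_0)

-- ===== LEMMAS AND PROOFS =====
theorem pyGet?_some_of_inRange {α : Type} (xs : List α) (i : Int)
    (h : PySem.Raise.InRange xs.length i) : ∃ v, PySem.List.pyGet? xs i = some v := by
  rcases e : PySem.List.pyGet? xs i with _ | v
  · exact absurd ((PySem.List.pyGet?_eq_none_iff xs i).mp e) (fun hn => hn h)
  · exact ⟨v, rfl⟩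

-- ===== VERDICT (by name: the statement is the Claim_ definition above) =====
theorem smethod_8_spec : Claim_equal_smethod_8 := by
  intro int_0 bool_0 _ hPre
  obtain ⟨h0, h1, h2, h3⟩ := hPre
  obtain ⟨v0, e0⟩ := pyGet?_some_of_inRange bool_0 int_0 h0
  obtain ⟨v1, e1⟩ := pyGet?_some_of_inRange bool_0 (int_0 + 1) h1
  obtain ⟨v2, e2⟩ := pyGet?_some_of_inRange bool_0 (int_0 + 2) h2
  obtain ⟨v3, e3⟩ := pyGet?_some_of_inRange bool_0 (int_0 + 3) h3
  have hr : PySem.List.pyRange 0 4 1 = [0, 1, 2, 3] := by decide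
  unfold Spec_smethod_8 smethod_8 smethod_8_alt
  simp only [hr, List.foldl,
    show (3 : Int) - 0 = 3 by norm_num, show (3 : Int) - 1 = 2 by norm_num,
    show (3 : Int) - 2 = 1 by norm_num, show (3 : Int) - 3 = 0 by norm_num,
    show int_0 + 0 = int_0 by ring,
    e0, e1, e2, e3, Option.bind_some, Option.map_some]
  cases v0 <;> cases v1 <;> cases v2 <;> cases v3 <;> rfl
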